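-- pv_equiv track=rewrite | github.com/fifthfir/cs61a-22fall | projects/cats/test.py | shifty_shifts
-- ===== SOURCE A (Python) =====
-- def shifty_shifts(start, goal, limit):
--     '''
--     >>> shifty_shifts("awful", "awesome", 3)
--     5
--     '''
--     if limit < 0:
--         return max(len(start), len(goal))
--     if len(start) == 0 or len(goal) == 0:
--         if start == goal:
--             return 0
--         else:
--             return max(len(start), len(goal))
--     else:
--         if start[0] == goal[0]:
--             step = 0
--         else:
--             step = 1
--         return step + shifty_shifts(start[1:], goal[1:], limit - 1)
-- ===== SOURCE B (Python) =====
-- def shifty_shifts(start, goal, limit):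
--     # Closed form: the recursion consumes t = min(len(start), len(goal), limit+1)
--     # characters (0 when limit < 0), counting mismatches, then pays max of the
--     # remaining lengths.
--     t = min(len(start), len(goal), max(limit + 1, 0))
--     mismatches = sum(1 for a, b in zip(start[:t], goal[:t]) if a != b)
--     return mismatches + max(len(start) - t, len(goal) - t)
-- ===== Notes on version B (the rewrite author's own statement) =====
-- stated objective: faster
-- what changed: Replaces the recursion over string slices by a closed form: one zip pass counting mismatches over the first min(len(start), len(goal), limit+1) characters plus the max of the remaining lengths, with no slicing per step.
import Mathlib
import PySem

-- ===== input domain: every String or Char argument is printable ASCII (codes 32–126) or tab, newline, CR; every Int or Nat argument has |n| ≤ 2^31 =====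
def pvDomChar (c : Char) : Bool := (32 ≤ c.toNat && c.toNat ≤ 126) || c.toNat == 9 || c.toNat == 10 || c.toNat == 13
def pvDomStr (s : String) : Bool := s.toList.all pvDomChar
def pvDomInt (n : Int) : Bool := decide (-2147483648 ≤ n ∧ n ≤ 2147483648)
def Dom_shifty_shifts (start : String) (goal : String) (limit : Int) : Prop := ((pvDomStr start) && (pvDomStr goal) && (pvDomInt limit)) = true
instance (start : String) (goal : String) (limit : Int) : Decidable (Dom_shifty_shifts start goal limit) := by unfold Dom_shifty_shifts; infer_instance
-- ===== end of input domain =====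

-- B replaces A's slice-copying recursion by a closed form (one mismatch-counting
-- pass over a prefix plus an arithmetic remainder); objective: faster.

-- ===== PORT A =====
-- A's recursion over the two strings' character lists; start[1:] / goal[1:] are the
-- tails, start[0] the head (taken only in the branch where both are nonempty).
def shifty_shifts_go (s : List Char) (g : List Char) (limit : Int) : Int :=
  if limit < 0 then
    max (s.length : Int) (g.length : Int)
  else if s.length = 0 ∨ g.length = 0 then
    if s = g then 0 else max (s.length : Int) (g.length : Int)
  else
    (if s.headI = g.headI then 0 else 1) + shifty_shifts_go s.tail g.tail (limit - 1)
termination_by s.length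
decreasing_by
  rename_i h2
  simp only [List.length_tail]
  omega

def shifty_shifts (start : String) (goal : String) (limit : Int) : Int :=
  shifty_shifts_go start.toList goal.toList limit

-- ===== PORT B =====
def shifty_shifts_alt (start : String) (goal : String) (limit : Int) : Int :=
  let s := start.toList
  let g := goal.toList
  let t : Int := min (min (s.length : Int) (g.length : Int)) (max (limit + 1) 0)
  let mismatches : Int :=
    (((s.take t.toNat).zip (g.take t.toNat)).filter (fun p => p.1 != p.2)).length
  mismatches + max ((s.length : Int) - t) ((g.length : Int) - t)

-- ===== PRECONDITION & SPEC =====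
def Spec_shifty_shifts (start : String) (goal : String) (limit : Int) (out : Int) : Prop := out = shifty_shifts_alt start goal limit
instance (start : String) (goal : String) (limit : Int) (out : Int) : Decidable (Spec_shifty_shifts start goal limit out) := by unfold Spec_shifty_shifts; infer_instance

-- ===== CLAIM (what is proved, stated in full; the proofs are below) =====
def Claim_equal_shifty_shifts : Prop := ∀ (start : String) (goal : String) (limit : Int), Dom_shifty_shifts start goal limit → Spec_shifty_shifts start goal limit (shifty_shifts start goal limit)

-- ===== LEMMAS AND PROOFS =====

def pvMism (s g : List Char) : Nat :=
  ((s.zip g).filter (fun p => p.1 != p.2)).length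

lemma pvMism_cons (a b : Char) (s g : List Char) :
    pvMism (a :: s) (b :: g) = (if a = b then 0 else 1) + pvMism s g := by
  simp only [pvMism, List.zip_cons_cons, List.filter_cons]
  by_cases h : a = b <;> simp [h, Nat.add_comm]

lemma go_closed (s g : List Char) (l : Int) :
    shifty_shifts_go s g l =
      (pvMism (s.take (min (min s.length g.length) (l + 1).toNat))
              (g.take (min (min s.length g.length) (l + 1).toNat)) : Int)
        + max ((s.length : Int) - (min (min s.length g.length) (l + 1).toNat))
              ((g.length : Int) - (min (min s.length g.length) (l + 1).toNat)) := by
  induction s generalizing g l with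
  | nil =>
      rw [shifty_shifts_go]
      rcases g with _ | ⟨b, g'⟩ <;> simp [pvMism]
  | cons a s' ih =>
      rw [shifty_shifts_go]
      rcases g with _ | ⟨b, g'⟩
      · simp [pvMism]
      · by_cases hl : l < 0
        · have : (l + 1).toNat = 0 := by omega
          simp [hl, this, pvMism]
        · have ht : (l + 1).toNat = (l - 1 + 1).toNat + 1 := by omega
          have hmin : min (min (a :: s').length (b :: g').length) ((l - 1 + 1).toNat + 1)
              = min (min s'.length g'.length) ((l - 1 + 1).toNat) + 1 := by
            simp only [List.length_cons]
            omega
          simp only [hl, List.length_cons,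
            if_neg (by omega : ¬ ((s'.length + 1 = 0) ∨ (g'.length + 1 = 0))),
            List.headI, List.tail_cons, ih g' (l - 1), ht]
          rw [show min (min (s'.length + 1) (g'.length + 1)) ((l - 1 + 1).toNat + 1)
              = min (min s'.length g'.length) ((l - 1 + 1).toNat) + 1 by omega]
          rw [List.take_succ_cons, List.take_succ_cons, pvMism_cons]
          by_cases hab : a = b <;> simp [hab] <;> omega

-- ===== VERDICT (by name: the statement is the Claim_ definition above) =====
theorem shifty_shifts_spec : Claim_equal_shifty_shifts := by
  intro start goal limit _
  show shifty_shifts start goal limit = shifty_shifts_alt start goal limit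
  unfold shifty_shifts shifty_shifts_alt
  rw [go_closed]
  have hT : (min (min (start.toList.length : Int) (goal.toList.length : Int))
      (max (limit + 1) 0)).toNat
      = min (min start.toList.length goal.toList.length) (limit + 1).toNat := by
    omega
  simp only [pvMism, hT]
  omega
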